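-- pv_equiv track=rewrite | github.com/1g-hub/Horimoto | StoryboardOCR/src/NeedNotToKnow/noVL_stage2_align_and_clean.py | adjacent_transposition_distance
-- ===== SOURCE A (Python) =====
-- def adjacent_transposition_distance(a: str, b: str) -> int:
--     """
--     a と b が「隣接2文字の入れ替え」1回で一致するなら 1 を返す。
--     それ以外は大きい値を返す。
--     例: ベルリ <-> ベリル は 1
--     """
--     if len(a) != len(b):
--         return 10**9
--     if a == b:
--         return 0
--
--     n = len(a)
--     for i in range(n - 1):
--         if (
--             a[:i] == b[:i]
--             and a[i] == b[i + 1]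
--             and a[i + 1] == b[i]
--             and a[i + 2 :] == b[i + 2 :]
--         ):
--             return 1
--     return 10**9
-- ===== SOURCE B (Python) =====
-- def adjacent_transposition_distance(a: str, b: str) -> int:
--     """One pass: find the first mismatching index and check it is an
--     adjacent swap; O(n) instead of A's O(n^2) scan of all split points."""
--     if len(a) != len(b):
--         return 10**9
--     if a == b:
--         return 0
--     i = 0
--     while a[i] == b[i]:
--         i += 1
--     if i + 1 < len(a) and a[i] == b[i + 1] and a[i + 1] == b[i] and a[i + 2:] == b[i + 2:]:
--         return 1
--     return 10**9
-- ===== Notes on version B (the rewrite author's own statement) =====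
-- stated objective: faster
-- what changed: Instead of scanning every split point i and comparing prefix/suffix slices (quadratic), B locates the first mismatching index in one pass and checks only there for an adjacent swap.
import Mathlib
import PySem

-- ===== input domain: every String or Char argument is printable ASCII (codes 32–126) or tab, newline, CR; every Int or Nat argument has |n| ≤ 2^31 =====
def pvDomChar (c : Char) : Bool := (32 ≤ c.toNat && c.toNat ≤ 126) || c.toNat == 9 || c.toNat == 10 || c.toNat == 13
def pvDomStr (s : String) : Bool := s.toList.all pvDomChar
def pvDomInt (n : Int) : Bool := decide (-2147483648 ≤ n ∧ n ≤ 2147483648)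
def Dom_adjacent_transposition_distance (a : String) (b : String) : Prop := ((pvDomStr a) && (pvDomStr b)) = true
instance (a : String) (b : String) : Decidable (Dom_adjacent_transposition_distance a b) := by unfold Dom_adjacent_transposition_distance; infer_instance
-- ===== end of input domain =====

-- B finds the first mismatching index in one pass and checks it is an adjacent swap,
-- instead of A's O(n^2) scan over all split points with slice comparisons; exact same return values.


-- ===== PORT A =====
-- the loop body's condition: a[:i] == b[:i] and a[i] == b[i+1] and a[i+1] == b[i] and a[i+2:] == b[i+2:]
def atdCond (la lb : List Char) (i : Int) : Bool :=
  (PySem.List.slice la none (some i) == PySem.List.slice lb none (some i)) &&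
  (PySem.List.pyGet? la i == PySem.List.pyGet? lb (i + 1)) &&
  (PySem.List.pyGet? la (i + 1) == PySem.List.pyGet? lb i) &&
  (PySem.List.slice la (some (i + 2)) none == PySem.List.slice lb (some (i + 2)) none)

def adjacent_transposition_distance (a : String) (b : String) : Int :=
  let la := a.toList
  let lb := b.toList
  if la.length ≠ lb.length then 1000000000
  else if la = lb then 0
  else
    -- for i in range(n - 1): if cond: return 1   /   return 10**9
    if (PySem.List.pyRange 0 ((la.length : Int) - 1) 1).any (atdCond la lb) then 1
    else 1000000000

-- ===== PORT B =====
-- the while loop skipping equal heads, then the adjacent-swap check at the first mismatch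
def atdCheck : List Char → List Char → Int
  | x :: xs, y :: ys =>
    if x = y then atdCheck xs ys
    else
      match xs, ys with
      | x2 :: xs2, y2 :: ys2 => if x = y2 ∧ x2 = y ∧ xs2 = ys2 then 1 else 1000000000
      | _, _ => 1000000000
  | _, _ => 1000000000

def adjacent_transposition_distance_alt (a : String) (b : String) : Int :=
  let la := a.toList
  let lb := b.toList
  if la.length ≠ lb.length then 1000000000
  else if la = lb then 0
  else atdCheck la lb

-- ===== PRECONDITION & SPEC =====
def Spec_adjacent_transposition_distance (a : String) (b : String) (out : Int) : Prop := out = adjacent_transposition_distance_alt a b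
instance (a : String) (b : String) (out : Int) : Decidable (Spec_adjacent_transposition_distance a b out) := by unfold Spec_adjacent_transposition_distance; infer_instance

-- ===== CLAIM (what is proved, stated in full; the proofs are below) =====
def Claim_equal_adjacent_transposition_distance : Prop := ∀ (a : String) (b : String), Dom_adjacent_transposition_distance a b → Spec_adjacent_transposition_distance a b (adjacent_transposition_distance a b)

-- ===== LEMMAS AND PROOFS =====

-- "an adjacent swap at position k" as a Nat-indexed proposition
def PSwap (la lb : List Char) (k : Nat) : Prop :=
  k + 1 < la.length ∧ la.take k = lb.take k ∧ la[k]? = lb[k + 1]? ∧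
  la[k + 1]? = lb[k]? ∧ la.drop (k + 2) = lb.drop (k + 2)

lemma pswap_succ (x y : Char) (xs ys : List Char) (k : Nat) :
    PSwap (x :: xs) (y :: ys) (k + 1) ↔ x = y ∧ PSwap xs ys k := by
  simp [PSwap, List.take_succ_cons, List.drop_succ_cons]
  tauto

lemma pswap_zero (x y x2 y2 : Char) (xs2 ys2 : List Char) :
    PSwap (x :: x2 :: xs2) (y :: y2 :: ys2) 0 ↔ x = y2 ∧ x2 = y ∧ xs2 = ys2 := by
  simp [PSwap]

lemma atdCond_iff_pswap (la lb : List Char) (k : Nat) (hk : k + 1 < la.length) :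
    atdCond la lb (k : Int) = true ↔ PSwap la lb k := by
  have h2 : ((k : Int) + 2) = ((k + 2 : Nat) : Int) := by push_cast; ring
  have h1 : ((k : Int) + 1) = ((k + 1 : Nat) : Int) := by push_cast; ring
  unfold atdCond PSwap
  rw [h2, h1, PySem.List.slice_to_natCast, PySem.List.slice_to_natCast,
      PySem.List.slice_from_natCast, PySem.List.slice_from_natCast]
  simp only [PySem.List.pyGet?_natCast, Bool.and_eq_true, beq_iff_eq]
  constructor
  · rintro ⟨⟨⟨ht, h3⟩, h4⟩, h5⟩; exact ⟨hk, ht, h3, h4, h5⟩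
  · rintro ⟨_, ht, h3, h4, h5⟩; exact ⟨⟨⟨ht, h3⟩, h4⟩, h5⟩

lemma any_iff_pswap (la lb : List Char) :
    ((PySem.List.pyRange 0 ((la.length : Int) - 1) 1).any (atdCond la lb) = true) ↔
      ∃ k, PSwap la lb k := by
  rw [List.any_eq_true]
  constructor
  · rintro ⟨i, hmem, hcond⟩
    rw [PySem.List.mem_pyRange_one] at hmem
    obtain ⟨h0, hlt⟩ := hmem
    have hk : i = ((i.toNat : Nat) : Int) := by omega
    have hklt : i.toNat + 1 < la.length := by omega
    exact ⟨i.toNat, (atdCond_iff_pswap la lb i.toNat hklt).1 (by rwa [hk] at hcond)⟩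
  · rintro ⟨k, hps⟩
    have hklt : k + 1 < la.length := hps.1
    refine ⟨(k : Int), ?_, (atdCond_iff_pswap la lb k hklt).2 hps⟩
    rw [PySem.List.mem_pyRange_one]
    omega

lemma atdCheck_cases : ∀ la lb : List Char, atdCheck la lb = 1 ∨ atdCheck la lb = 1000000000
  | [], _ => by right; rfl
  | _ :: _, [] => by right; rfl
  | x :: xs, y :: ys => by
    by_cases hxy : x = y
    · simpa [atdCheck, hxy] using atdCheck_cases xs ys
    · cases xs with
      | nil => right; simp [atdCheck, hxy]
      | cons x2 xs2 =>
        cases ys with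
        | nil => right; simp [atdCheck, hxy]
        | cons y2 ys2 =>
          by_cases hc : x = y2 ∧ x2 = y ∧ xs2 = ys2
          · left; rw [show atdCheck (x :: x2 :: xs2) (y :: y2 :: ys2)
                = if x = y2 ∧ x2 = y ∧ xs2 = ys2 then 1 else 1000000000 from by
              simp [atdCheck, hxy], if_pos hc]
          · right; rw [show atdCheck (x :: x2 :: xs2) (y :: y2 :: ys2)
                = if x = y2 ∧ x2 = y ∧ xs2 = ys2 then 1 else 1000000000 from by
              simp [atdCheck, hxy], if_neg hc]

lemma pswap_iff_check : ∀ la lb : List Char, la.length = lb.length → la ≠ lb →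
    ((∃ k, PSwap la lb k) ↔ atdCheck la lb = 1)
  | [], [], _, hne => by simp at hne
  | [], _ :: _, hlen, _ => by simp at hlen
  | _ :: _, [], hlen, _ => by simp at hlen
  | x :: xs, y :: ys, hlen, hne => by
    have hlen' : xs.length = ys.length := by simpa using hlen
    by_cases hxy : x = y
    · subst hxy
      have hne' : xs ≠ ys := fun h => hne (by rw [h])
      rw [show atdCheck (x :: xs) (x :: ys) = atdCheck xs ys by simp [atdCheck]]
      rw [← pswap_iff_check xs ys hlen' hne']
      constructor
      · rintro ⟨k, hps⟩
        cases k with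
        | zero =>
          exfalso
          cases xs with
          | nil =>
            have := hps.1
            simp at this
          | cons x2 xs2 =>
            cases ys with
            | nil => simp at hlen'
            | cons y2 ys2 =>
              obtain ⟨h1, h2, h3⟩ := (pswap_zero x x x2 y2 xs2 ys2).1 hps
              exact hne' (by rw [h2, ← h1, h3])
        | succ k' => exact ⟨k', ((pswap_succ x x xs ys k').1 hps).2⟩
      · rintro ⟨k, hps⟩
        exact ⟨k + 1, (pswap_succ x x xs ys k).2 ⟨rfl, hps⟩⟩
    · cases xs with
      | nil =>
        cases ys with
        | nil =>
          constructor
          · rintro ⟨k, hps⟩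
            have := hps.1
            simp at this
          · intro h; simp [atdCheck, hxy] at h
        | cons _ _ => simp at hlen'
      | cons x2 xs2 =>
        cases ys with
        | nil => simp at hlen'
        | cons y2 ys2 =>
          rw [show atdCheck (x :: x2 :: xs2) (y :: y2 :: ys2)
              = if x = y2 ∧ x2 = y ∧ xs2 = ys2 then 1 else 1000000000 by
            simp [atdCheck, hxy]]
          constructor
          · rintro ⟨k, hps⟩
            cases k with
            | zero =>
              rw [pswap_zero] at hps
              simp [hps]
            | succ k' => exact absurd ((pswap_succ x y _ _ k').1 hps).1 hxy
          · intro h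
            split_ifs at h with hc
            · exact ⟨0, (pswap_zero x y x2 y2 xs2 ys2).2 hc⟩
            · simp at h

-- ===== VERDICT (by name: the statement is the Claim_ definition above) =====
theorem adjacent_transposition_distance_spec : Claim_equal_adjacent_transposition_distance := by
  intro a b _
  unfold Spec_adjacent_transposition_distance adjacent_transposition_distance
    adjacent_transposition_distance_alt
  dsimp only
  split_ifs with h1 h2 h3
  · rfl
  · rfl
  · have hlen : a.toList.length = b.toList.length := not_ne_iff.mp h1
    exact ((pswap_iff_check _ _ hlen h2).1 ((any_iff_pswap _ _).1 h3)).symm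
  · have hlen : a.toList.length = b.toList.length := not_ne_iff.mp h1
    rcases atdCheck_cases a.toList b.toList with hc | hc
    · exact absurd ((any_iff_pswap _ _).2 ((pswap_iff_check _ _ hlen h2).2 hc)) h3
    · rw [hc]
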